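-- pv_equiv track=rewrite | github.com/guillenodlwlrmalvin/aicodechecker | aicodechecker-main/deep_learning_detector.py | _count_code_sections
-- ===== SOURCE A (Python) =====
-- from typing import Dict, List, Tuple, Any, Optional
--
-- def _count_code_sections(lines: List[str]) -> int:
--     """Count distinct code sections separated by blank lines."""
--     sections = 0
--     in_section = False
--
--     for line in lines:
--         if line.strip():
--             if not in_section:
--                 sections += 1
--                 in_section = True
--         else:
--             in_section = False
--
--     return sections
-- ===== SOURCE B (Python) =====
-- def _count_code_sections(lines):
--     """Encode each line as one marker char ('x' non-blank, ' ' blank) and let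
--     str.split() count the maximal runs of non-blank markers."""
--     markers = "".join("x" if line.strip() else " " for line in lines)
--     return len(markers.split())
-- ===== Notes on version B (the rewrite author's own statement) =====
-- stated objective: alternative
-- what changed: Replaces the stateful in_section flag loop by encoding the lines as a marker string (one char per line: 'x' for non-blank, ' ' for blank) and counting the words produced by str.split(), whose whitespace-run splitting does the section grouping.
import Mathlib
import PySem

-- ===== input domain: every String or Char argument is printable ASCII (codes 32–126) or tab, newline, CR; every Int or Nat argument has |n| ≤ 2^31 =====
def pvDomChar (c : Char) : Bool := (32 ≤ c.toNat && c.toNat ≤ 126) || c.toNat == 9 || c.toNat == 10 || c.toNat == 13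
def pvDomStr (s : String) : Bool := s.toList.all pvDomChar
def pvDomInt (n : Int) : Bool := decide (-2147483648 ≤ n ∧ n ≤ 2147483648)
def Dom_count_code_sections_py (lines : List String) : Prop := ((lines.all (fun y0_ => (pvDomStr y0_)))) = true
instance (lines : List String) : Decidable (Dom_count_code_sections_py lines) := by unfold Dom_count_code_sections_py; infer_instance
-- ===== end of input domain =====

-- B replaces A's stateful in_section-flag loop by encoding each line as one marker char ('x' non-blank, ' ' blank) and counting the words str.split() finds in that marker string (alternative algorithm/data structure, same cost).


-- ===== PORT A =====
def count_code_sections_py (lines : List String) : Int :=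
  (lines.foldl
    (fun (st : Int × Bool) line =>
      if PySem.Str.strip line ≠ "" then
        (if st.2 = false then (st.1 + 1, true) else st)
      else (st.1, false))
    (0, false)).1

-- ===== PORT B =====
def count_code_sections_py_alt (lines : List String) : Int :=
  let markers := PySem.Str.join "" (lines.map (fun line => if PySem.Str.strip line ≠ "" then "x" else " "))
  ((PySem.Str.split₀ markers).length : Int)

-- ===== PRECONDITION & SPEC =====
def Spec_count_code_sections_py (lines : List String) (out : Int) : Prop := out = count_code_sections_py_alt lines
instance (lines : List String) (out : Int) : Decidable (Spec_count_code_sections_py lines out) := by unfold Spec_count_code_sections_py; infer_instance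

-- ===== CLAIM (what is proved, stated in full; the proofs are below) =====
def Claim_equal_count_code_sections_py : Prop := ∀ (lines : List String), Dom_count_code_sections_py lines → Spec_count_code_sections_py lines (count_code_sections_py lines)

-- ===== LEMMAS AND PROOFS =====

-- number of whitespace-separated words of cs, given whether a word is currently open
def ccsW : List Char → Bool → Nat
  | [], b => if b then 1 else 0
  | c :: rest, b =>
    if PySem.Chars.isspace c then (if b then 1 else 0) + ccsW rest false
    else ccsW rest true

lemma ccs_go_length (cs : List Char) (cur : List Char) (acc : List (List Char)) :
    (PySem.Chars.split₀.go cs cur acc).length = acc.length + ccsW cs (!cur.isEmpty) := by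
  induction cs generalizing cur acc with
  | nil =>
    by_cases h : cur.isEmpty <;> simp [PySem.Chars.split₀.go, ccsW, h]
  | cons c rest ih =>
    by_cases hs : PySem.Chars.isspace c
    · by_cases h : cur.isEmpty
      · simp [PySem.Chars.split₀.go, ccsW, hs, h, ih]
      · simp [PySem.Chars.split₀.go, ccsW, hs, h, ih]; omega
    · simp [PySem.Chars.split₀.go, ccsW, hs, ih, List.isEmpty_cons]

lemma ccs_fold_eq_W (cs : List Char) (s : Int) (b : Bool) :
    (cs.foldl
      (fun (st : Int × Bool) c =>
        if PySem.Chars.isspace c = false then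
          (if st.2 = false then (st.1 + 1, true) else st)
        else (st.1, false))
      (s, b)).1 = s + (ccsW cs b : Int) - (if b then 1 else 0) := by
  induction cs generalizing s b with
  | nil => cases b <;> simp [ccsW]
  | cons c rest ih =>
    by_cases hs : PySem.Chars.isspace c <;> cases b <;>
      simp [ccsW, hs, ih] <;> omega

theorem count_code_sections_py_spec : Claim_equal_count_code_sections_py := by
  intro lines _
  unfold Spec_count_code_sections_py count_code_sections_py count_code_sections_py_alt
  have hm : (PySem.Str.join ""
      (lines.map (fun line => if PySem.Str.strip line ≠ "" then "x" else " "))).toList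
      = lines.map (fun line => if PySem.Str.strip line ≠ "" then 'x' else ' ') := by
    simp only [PySem.Str.join, String.toList_ofList, List.map_map]
    have : (String.toList ∘ fun line => if PySem.Str.strip line ≠ "" then "x" else " ")
        = (fun c => [c]) ∘ (fun line => if PySem.Str.strip line ≠ "" then 'x' else ' ') := by
      funext line; by_cases h : PySem.Str.strip line = "" <;> simp [h]
    rw [this, ← List.map_map]
    exact PySem.Chars.join_nil_singletons _
  simp only [PySem.Str.split₀, List.length_map, hm]
  rw [show PySem.Chars.split₀ (lines.map (fun line => if PySem.Str.strip line ≠ "" then 'x' else ' '))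
      = PySem.Chars.split₀.go (lines.map (fun line => if PySem.Str.strip line ≠ "" then 'x' else ' ')) [] [] from rfl]
  have hA : (lines.foldl
      (fun (st : Int × Bool) line =>
        if PySem.Str.strip line ≠ "" then
          (if st.2 = false then (st.1 + 1, true) else st)
        else (st.1, false)) (0, false))
      = ((lines.map (fun line => if PySem.Str.strip line ≠ "" then 'x' else ' ')).foldl
        (fun (st : Int × Bool) c =>
          if PySem.Chars.isspace c = false then
            (if st.2 = false then (st.1 + 1, true) else st)
          else (st.1, false)) (0, false)) := by
    rw [List.foldl_map]
    congr 1
    funext st line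
    have hx : PySem.Chars.isspace 'x' = false := by decide
    have hsp : PySem.Chars.isspace ' ' = true := by decide
    by_cases h : PySem.Str.strip line = "" <;> simp [h, hx, hsp]
  rw [hA, ccs_fold_eq_W, ccs_go_length]
  simp

-- ===== VERDICT (by name: the statement is the Claim_ definition above) =====
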